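-- pv_equiv track=rewrite | github.com/Not-Yeshwanth-Reddy/PC_Assistant | Understanding.py | remove_waste_mouse_logs
-- ===== SOURCE A (Python) =====
-- def remove_waste_mouse_logs(Log_list):									# Removing Extra MouseMoved Logs
-- 	line_no	= 0
-- 	count	= 0
-- 	word_list	= []
-- 	for line in Log_list:
-- 		if("Mouse _|_ Moved" in line):
-- 			if(count==0):
-- 				word_list.append(Log_list[line_no]) 								# append to the list
-- 			count+=1
-- 		else:
-- 			if(count!=0):
-- 				word_list.append(Log_list[(line_no-1)]) 							# append to the list
-- 			word_list.append(Log_list[line_no]) 									# append to the list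
-- 			count=0
-- 		line_no+=1
-- 	return word_list
-- ===== SOURCE B (Python) =====
-- def remove_waste_mouse_logs(Log_list):
--     # Pass 1: split the log into maximal consecutive runs with the same mouse-moved flag.
--     runs = []
--     for line in Log_list:
--         m = "Mouse _|_ Moved" in line
--         if runs and runs[-1][0] == m:
--             runs[-1][1].append(line)
--         else:
--             runs.append((m, [line]))
--     # Pass 2: a mouse run contributes its first line now and its last line just before
--     # the next non-mouse run; a trailing mouse run is never flushed.
--     out = []
--     saved = None
--     for m, grp in runs:
--         if m:
--             out.append(grp[0])
--             saved = grp
--         else: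
--             if saved is not None:
--                 out.append(saved[-1])
--                 saved = None
--             out.extend(grp)
--     return out
-- ===== Notes on version B (the rewrite author's own statement) =====
-- stated objective: alternative
-- what changed: Replaces A's single index-tracking loop with a counter (which re-reads Log_list[line_no] and Log_list[line_no-1]) by a two-phase decomposition: first group the log into maximal consecutive runs by the mouse-moved flag, then emit per run (a mouse run contributes its first line, plus its last line when a non-mouse run follows; non-mouse runs pass through whole).
import Mathlib
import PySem

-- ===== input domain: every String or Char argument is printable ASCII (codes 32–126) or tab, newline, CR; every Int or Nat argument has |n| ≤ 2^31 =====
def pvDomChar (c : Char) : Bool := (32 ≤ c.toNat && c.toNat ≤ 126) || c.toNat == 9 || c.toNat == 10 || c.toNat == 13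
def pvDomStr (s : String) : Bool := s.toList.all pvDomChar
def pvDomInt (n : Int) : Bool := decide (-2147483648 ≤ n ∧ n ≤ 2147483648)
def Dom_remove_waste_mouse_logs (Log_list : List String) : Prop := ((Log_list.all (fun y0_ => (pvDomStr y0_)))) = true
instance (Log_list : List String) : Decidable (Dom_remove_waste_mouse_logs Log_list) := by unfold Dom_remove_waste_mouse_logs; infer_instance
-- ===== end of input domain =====

-- B re-groups the log into maximal runs by the mouse-moved flag and emits per run,
-- instead of A's index-tracking counter loop (objective: alternative decomposition; same O(n) cost).

-- shared helper: Python's '"Mouse _|_ Moved" in line'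
def pvMouse (line : String) : Bool := PySem.Str.isIn "Mouse _|_ Moved" line

-- ===== PORT A =====
-- A indexes Log_list[line_no] / Log_list[line_no-1]; both indexes are always valid while
-- the loop runs (line_no-1 is only read when count≠0, i.e. line_no ≥ 1), so the '.getD ""'
-- default on pyGet? is never taken and the port is exact.
def pvStepA (L : List String) (st : Int × Int × List String) (line : String) : Int × Int × List String :=
  let line_no := st.1
  let count := st.2.1
  let word_list := st.2.2
  if pvMouse line then
    (line_no + 1, count + 1,
      if count == 0 then word_list ++ [(PySem.List.pyGet? L line_no).getD ""] else word_list)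
  else
    (line_no + 1, 0,
      (if count != 0 then word_list ++ [(PySem.List.pyGet? L (line_no - 1)).getD ""] else word_list)
        ++ [(PySem.List.pyGet? L line_no).getD ""])

def remove_waste_mouse_logs (Log_list : List String) : List String :=
  (Log_list.foldl (pvStepA Log_list) (0, 0, [])).2.2

-- ===== PORT B =====
-- pass 1 of Source B: append line to the last run if its flag matches, else start a new run
def pvStepRuns (runs : List (Bool × List String)) (line : String) : List (Bool × List String) :=
  let m := pvMouse line
  match runs.getLast? with
  | some (b, g) => if b == m then runs.dropLast ++ [(b, g ++ [line])] else runs ++ [(m, [line])]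
  | none => runs ++ [(m, [line])]

-- pass 2 of Source B: mouse run → first element, remember the run; non-mouse run → flush saved
-- run's last element, then the whole run.  Groups are nonempty, so '.getD ""' is never taken.
def pvStepB (st : List String × Option (List String)) (run : Bool × List String) :
    List String × Option (List String) :=
  let out := st.1
  let saved := st.2
  if run.1 then
    (out ++ [(PySem.List.pyGet? run.2 0).getD ""], some run.2)
  else
    match saved with
    | some r => (out ++ [(PySem.List.pyGet? r (-1)).getD ""] ++ run.2, none)
    | none => (out ++ run.2, none)

def remove_waste_mouse_logs_alt (Log_list : List String) : List String :=
  ((Log_list.foldl pvStepRuns []).foldl pvStepB ([], none)).1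

-- ===== PRECONDITION & SPEC =====
def Spec_remove_waste_mouse_logs (Log_list : List String) (out : List String) : Prop := out = remove_waste_mouse_logs_alt Log_list
instance (Log_list : List String) (out : List String) : Decidable (Spec_remove_waste_mouse_logs Log_list out) := by unfold Spec_remove_waste_mouse_logs; infer_instance

-- ===== CLAIM (what is proved, stated in full; the proofs are below) =====
def Claim_equal_remove_waste_mouse_logs : Prop := ∀ (Log_list : List String), Dom_remove_waste_mouse_logs Log_list → Spec_remove_waste_mouse_logs Log_list (remove_waste_mouse_logs Log_list)

-- ===== LEMMAS AND PROOFS =====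

-- reference recursion: pvF = "not inside a mouse run", pvG p = "inside a mouse run whose
-- last line seen is p (its first line already emitted)"
mutual
def pvF : List String → List String
  | [] => []
  | l :: t => if pvMouse l then l :: pvG l t else l :: pvF t
def pvG (p : String) : List String → List String
  | [] => []
  | l :: t => if pvMouse l then pvG l t else p :: l :: pvF t
end

-- span-style recursive grouping (first maximal run, then the rest)
def pvGroup : List String → List (Bool × List String)
  | [] => []
  | l :: t =>
    (pvMouse l, l :: t.takeWhile (fun x => pvMouse x == pvMouse l)) ::
      pvGroup (t.dropWhile (fun x => pvMouse x == pvMouse l))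
termination_by L => L.length
decreasing_by
  exact Nat.lt_succ_of_le (List.length_dropWhile_le _ _)

-- ---- A's loop equals the reference recursion ----
lemma pvA_main : ∀ (L' pre acc : List String) (count : Int),
    (count = 0 ∨ (1 ≤ count ∧ pre ≠ [])) →
    (L'.foldl (pvStepA (pre ++ L')) ((pre.length : Int), count, acc)).2.2
      = acc ++ (if count = 0 then pvF L' else pvG (pre.getLastD "") L') := by
  intro L'
  induction L' with
  | nil =>
    intro pre acc count h
    rcases h with h0 | h1
    · simp [h0, pvF]
    · rw [if_neg (by omega)]
      simp [pvG]
  | cons l t ih =>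
    intro pre acc count h
    have hrw : pre ++ l :: t = (pre ++ [l]) ++ t := by simp
    have hget : (PySem.List.pyGet? (pre ++ l :: t) (pre.length : Int)).getD "" = l := by
      simp
    have hlen1 : ((pre.length : Int) + 1) = (((pre ++ [l]).length : Nat) : Int) := by
      push_cast [List.length_append, List.length_cons, List.length_nil]; ring
    simp only [List.foldl_cons, pvStepA, hget, beq_iff_eq, bne_iff_ne, ne_eq]
    by_cases hm : pvMouse l
    · -- mouse line
      rw [if_pos hm, hlen1, hrw,
        ih (pre ++ [l]) _ (count + 1) (Or.inr ⟨by rcases h with h0 | h1 <;> omega, by simp⟩)]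
      have hc1 : ¬ (count + 1 = 0) := by rcases h with h0 | h1 <;> omega
      rw [if_neg hc1, List.getLastD_concat]
      rcases h with h0 | h1
      · rw [if_pos h0, if_pos h0]
        rw [show pvF (l :: t) = l :: pvG l t from by rw [pvF, if_pos hm]]
        simp
      · rw [if_neg (by omega), if_neg (by omega)]
        rw [show pvG (pre.getLastD "") (l :: t) = pvG l t from by rw [pvG, if_pos hm]]
    · -- non-mouse line
      rw [if_neg hm]
      rcases h with h0 | ⟨h1, hpre⟩
      · subst h0
        rw [if_neg (by simp), hlen1, hrw, ih (pre ++ [l]) _ 0 (Or.inl rfl)]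
        rw [if_pos rfl, if_pos rfl]
        rw [show pvF (l :: t) = l :: pvF t from by rw [pvF, if_neg hm]]
        simp
      · have hne : ¬ (count = 0) := by omega
        have hprev : (PySem.List.pyGet? (pre ++ l :: t) ((pre.length : Int) - 1)).getD ""
            = pre.getLastD "" := by
          have hlen : 1 ≤ pre.length := by
            cases pre with
            | nil => exact absurd rfl hpre
            | cons a b => simp
          have hcast : ((pre.length : Int) - 1) = ((pre.length - 1 : Nat) : Int) := by
            omega
          rw [hcast, PySem.List.pyGet?_natCast]
          rw [List.getElem?_append_left (by omega)]
          rw [← List.getLast?_eq_getElem?]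
          rw [List.getLastD_eq_getLast?]
        rw [if_pos hne, hprev, hlen1, hrw, ih (pre ++ [l]) _ 0 (Or.inl rfl)]
        rw [if_pos rfl, if_neg hne]
        rw [show pvG (pre.getLastD "") (l :: t) = pre.getLastD "" :: l :: pvF t from by
          rw [pvG, if_neg hm]]
        simp

-- ---- B's first pass equals span-style grouping ----
lemma pvRuns_go : ∀ (L : List String) (rs : List (Bool × List String)) (b : Bool) (g : List String),
    L.foldl pvStepRuns (rs ++ [(b, g)])
      = rs ++ (b, g ++ L.takeWhile (fun x => pvMouse x == b)) ::
          pvGroup (L.dropWhile (fun x => pvMouse x == b)) := by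
  intro L
  induction L with
  | nil =>
    intro rs b g
    simp only [List.takeWhile_nil, List.dropWhile_nil, List.foldl_nil,
      show pvGroup [] = [] from by rw [pvGroup]]
    simp
  | cons l t ih =>
    intro rs b g
    simp only [List.foldl_cons]
    by_cases hb : b = pvMouse l
    · have hstep : pvStepRuns (rs ++ [(b, g)]) l = rs ++ [(b, g ++ [l])] := by
        simp [pvStepRuns, hb]
      rw [hstep, ih]
      simp [hb.symm]
    · have hne : (b == pvMouse l) = false := beq_eq_false_iff_ne.mpr hb
      have hne' : (pvMouse l == b) = false := beq_eq_false_iff_ne.mpr (Ne.symm hb)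
      have hstep : pvStepRuns (rs ++ [(b, g)]) l
          = (rs ++ [(b, g)]) ++ [(pvMouse l, [l])] := by
        simp [pvStepRuns, hne]
      rw [hstep, ih]
      simp only [List.takeWhile_cons, List.dropWhile_cons, hne', Bool.false_eq_true, if_false]
      rw [show pvGroup (l :: t) = (pvMouse l, l :: t.takeWhile (fun x => pvMouse x == pvMouse l)) ::
            pvGroup (t.dropWhile (fun x => pvMouse x == pvMouse l)) from by rw [pvGroup]]
      simp

lemma pvRuns_eq : ∀ L : List String, L.foldl pvStepRuns [] = pvGroup L := by
  intro L
  cases L with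
  | nil => rw [pvGroup]; rfl
  | cons l t =>
    simp only [List.foldl_cons]
    have hstep : pvStepRuns ([] : List (Bool × List String)) l
        = ([] : List (Bool × List String)) ++ [(pvMouse l, [l])] := by
      simp [pvStepRuns]
    rw [hstep, pvRuns_go]
    rw [show pvGroup (l :: t) = (pvMouse l, l :: t.takeWhile (fun x => pvMouse x == pvMouse l)) ::
          pvGroup (t.dropWhile (fun x => pvMouse x == pvMouse l)) from by rw [pvGroup]]
    simp

-- ---- pass-through lemmas for runs ----
lemma pvF_split : ∀ t : List String,
    pvF t = t.takeWhile (fun x => pvMouse x == false) ++ pvF (t.dropWhile (fun x => pvMouse x == false)) := by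
  intro t
  induction t with
  | nil => simp
  | cons y t' ih =>
    by_cases hy : pvMouse y
    · simp [hy]
    · rw [List.takeWhile_cons, List.dropWhile_cons]
      simp only [hy]
      rw [show pvF (y :: t') = y :: pvF t' from by rw [pvF, if_neg hy]]
      simpa using ih

lemma pvG_split : ∀ (t : List String) (p : String),
    pvG p t = pvG ((p :: t.takeWhile (fun x => pvMouse x == true)).getLastD "")
        (t.dropWhile (fun x => pvMouse x == true)) := by
  intro t
  induction t with
  | nil => intro p; simp
  | cons y t' ih =>
    intro p
    by_cases hy : pvMouse y
    · rw [List.takeWhile_cons, List.dropWhile_cons]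
      simp only [hy, beq_self_eq_true, if_true]
      rw [show pvG p (y :: t') = pvG y t' from by rw [pvG, if_pos hy], ih y]
      simp
    · rw [List.takeWhile_cons, List.dropWhile_cons]
      simp [hy]

-- ---- B's second pass over the groups equals the reference recursion ----
lemma pvProcess_main : ∀ (n : Nat) (L : List String), L.length ≤ n →
    (∀ out : List String, ((pvGroup L).foldl pvStepB (out, none)).1 = out ++ pvF L) ∧
    (∀ (out r : List String),
      (∀ x xs, L = x :: xs → pvMouse x = false) →
      ((pvGroup L).foldl pvStepB (out, some r)).1 = out ++ pvG (r.getLastD "") L) := by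
  intro n
  induction n with
  | zero =>
    intro L hL
    have hnil : L = [] := List.length_eq_zero_iff.mp (Nat.le_zero.mp hL)
    subst hnil
    rw [show pvGroup [] = [] from by rw [pvGroup]]
    constructor
    · intro out; simp [pvF]
    · intro out r _; simp [pvG]
  | succ n ih =>
    intro L hL
    cases L with
    | nil =>
      rw [show pvGroup [] = [] from by rw [pvGroup]]
      constructor
      · intro out; simp [pvF]
      · intro out r _; simp [pvG]
    | cons l t =>
      have hlen : ∀ p : String → Bool, (t.dropWhile p).length ≤ n := by
        intro p
        have h1 := List.length_dropWhile_le p t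
        simp only [List.length_cons] at hL
        omega
      rw [show pvGroup (l :: t) = (pvMouse l, l :: t.takeWhile (fun x => pvMouse x == pvMouse l)) ::
            pvGroup (t.dropWhile (fun x => pvMouse x == pvMouse l)) from by rw [pvGroup]]
      have hdrophead : ∀ (q : String → Bool) (x : String) (xs : List String),
          t.dropWhile q = x :: xs → q x = false := by
        intro q x xs hx
        have h := List.head_dropWhile_not q (l := t) (by simp [hx])
        simpa [hx] using h
      constructor
      · intro out
        by_cases hm : pvMouse l
        · -- mouse run: emit head, save run, continue in "saved" mode
          simp only [hm, List.foldl_cons]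
          have hstep : pvStepB (out, none) (true, l :: t.takeWhile (fun x => pvMouse x == true))
              = (out ++ [l], some (l :: t.takeWhile (fun x => pvMouse x == true))) := by
            simp [pvStepB]
          rw [hstep]
          rw [(ih _ (hlen _)).2 (out ++ [l]) _ (by
            intro x xs hx
            have := hdrophead _ x xs hx
            simpa using this)]
          rw [show pvF (l :: t) = l :: pvG l t from by rw [pvF, if_pos hm], pvG_split t l]
          simp
        · simp only [hm, List.foldl_cons]
          have hstep : pvStepB (out, none) (false, l :: t.takeWhile (fun x => pvMouse x == false))
              = (out ++ (l :: t.takeWhile (fun x => pvMouse x == false)), none) := by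
            simp [pvStepB]
          rw [hstep, (ih _ (hlen _)).1]
          rw [show pvF (l :: t) = l :: pvF t from by rw [pvF, if_neg hm], pvF_split t]
          simp
      · intro out r hhd
        have hm : pvMouse l = false := hhd l t rfl
        simp only [hm, List.foldl_cons]
        have hstep : pvStepB (out, some r) (false, l :: t.takeWhile (fun x => pvMouse x == false))
            = (out ++ [r.getLastD ""] ++ (l :: t.takeWhile (fun x => pvMouse x == false)), none) := by
          simp [pvStepB, PySem.List.pyGet?_neg_one, List.getLastD_eq_getLast?]
        rw [hstep, (ih _ (hlen _)).1]
        rw [show pvG (r.getLastD "") (l :: t) = r.getLastD "" :: l :: pvF t from by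
          rw [pvG, if_neg (by simp [hm])], pvF_split t]
        simp

-- ===== VERDICT (by name: the statement is the Claim_ definition above) =====
theorem remove_waste_mouse_logs_spec : Claim_equal_remove_waste_mouse_logs := by
  intro L _
  unfold Spec_remove_waste_mouse_logs remove_waste_mouse_logs remove_waste_mouse_logs_alt
  have hA := pvA_main L [] [] 0 (Or.inl rfl)
  simp only [List.nil_append, List.length_nil, Nat.cast_zero] at hA
  rw [hA, pvRuns_eq, (pvProcess_main L.length L le_rfl).1 []]
  simp
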